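-- pv_equiv track=rewrite | github.com/vitorbdiniz/jensen-alpha-fia | util.py | count_year_days
-- ===== SOURCE A (Python) =====
-- def count_year_days(dates):
--     '''
--         Conta dias úteis existentes em uma lista de datas
--     '''
--
--     res = []
--     days = 0
--     year = dates[0][0:4]
--     for d in dates:
--         if d[0:4] == year:
--             days += 1
--         else:
--             res += [days]
--             days = 1
--             year = d[0:4]
--
--     return res + [days]
-- ===== SOURCE B (Python) =====
-- def count_year_days(dates):
--     '''
--         Conta dias úteis existentes em uma lista de datas
--     '''
--
--     n = len(dates)
--     # stage 1: indices where a new year-run starts, plus the end sentinel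
--     cuts = [i for i in range(n) if i == 0 or dates[i][0:4] != dates[i - 1][0:4]] + [n]
--     # stage 2: run lengths are the differences of consecutive cut positions
--     return [b - a for a, b in zip(cuts, cuts[1:])]
-- ===== Notes on version B (the rewrite author's own statement) =====
-- stated objective: alternative
-- what changed: B replaces A's single streaming pass with a running counter and flush-on-change by a two-stage index computation: it first collects the boundary indices where the 4-char year prefix changes (plus an end sentinel) and then returns the pairwise differences of consecutive boundaries; no counter, no tracked current year, no flush.
import Mathlib
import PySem

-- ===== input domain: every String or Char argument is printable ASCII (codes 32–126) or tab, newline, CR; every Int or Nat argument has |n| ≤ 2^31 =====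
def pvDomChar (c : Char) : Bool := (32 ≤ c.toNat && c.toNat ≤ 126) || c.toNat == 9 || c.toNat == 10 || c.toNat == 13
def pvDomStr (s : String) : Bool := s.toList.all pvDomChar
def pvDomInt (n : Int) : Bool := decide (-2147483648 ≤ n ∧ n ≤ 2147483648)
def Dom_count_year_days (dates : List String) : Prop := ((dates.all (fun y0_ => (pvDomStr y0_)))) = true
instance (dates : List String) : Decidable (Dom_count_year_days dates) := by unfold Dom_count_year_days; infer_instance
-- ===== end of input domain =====

-- B computes year-change boundary indices and takes pairwise differences instead of A's streaming counter; equal cost, different decomposition.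

-- ===== PORT A =====
def count_year_days (dates : List String) : List Int :=
  match dates with
  | [] => []  -- Python raises IndexError here (dates[0]); excluded by Pre_
  | d0 :: _ =>
    let s := dates.foldl
      (fun (st : List Int × Int × String) d =>
        if PySem.Str.slice d (some 0) (some 4) = st.2.2 then
          (st.1, st.2.1 + 1, st.2.2)
        else
          (st.1 ++ [st.2.1], 1, PySem.Str.slice d (some 0) (some 4)))
      ([], 0, PySem.Str.slice d0 (some 0) (some 4))
    s.1 ++ [s.2.1]

-- ===== PORT B =====
-- dates[i] for i in range(n) (and i-1 for i ≥ 1) is always in range, so getD "" is exact here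
def pvYAt (dates : List String) (i : Int) : String :=
  PySem.Str.slice ((PySem.List.pyGet? dates i).getD "") (some 0) (some 4)

def count_year_days_alt (dates : List String) : List Int :=
  let n : Int := dates.length
  let cuts : List Int :=
    ((PySem.List.pyRange 0 n 1).filter
      (fun i => i == 0 || !(pvYAt dates i == pvYAt dates (i - 1)))) ++ [n]
  (cuts.zip cuts.tail).map (fun p => p.2 - p.1)

-- ===== PRECONDITION & SPEC =====
def Pre_count_year_days (dates : List String) : Prop := dates ≠ []
instance (dates : List String) : Decidable (Pre_count_year_days dates) := by unfold Pre_count_year_days; infer_instance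
def pvWitness_count_year_days : List String := ["2020-01-02", "2020-01-03", "2021-01-04"]


def Spec_count_year_days (dates : List String) (out : List Int) : Prop := out = count_year_days_alt dates
instance (dates : List String) (out : List Int) : Decidable (Spec_count_year_days dates out) := by unfold Spec_count_year_days; infer_instance

-- ===== CLAIM (what is proved, stated in full; the proofs are below) =====
def Claim_equal_count_year_days : Prop := ∀ (dates : List String), Dom_count_year_days dates → Pre_count_year_days dates → Spec_count_year_days dates (count_year_days dates)


-- ===== LEMMAS AND PROOFS =====

def pvS4 (d : String) : String := PySem.Str.slice d (some 0) (some 4)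

-- canonical run-counting function both ports are proved equal to
def pvGo (y : String) (c : Int) : List String → List Int
  | [] => [c]
  | d :: l => if pvS4 d = y then pvGo y (c + 1) l else c :: pvGo (pvS4 d) 1 l

lemma pvA_loop (l : List String) : ∀ (res : List Int) (days : Int) (y : String),
    (let s := l.foldl
      (fun (st : List Int × Int × String) d =>
        if PySem.Str.slice d (some 0) (some 4) = st.2.2 then
          (st.1, st.2.1 + 1, st.2.2)
        else
          (st.1 ++ [st.2.1], 1, PySem.Str.slice d (some 0) (some 4)))
      (res, days, y)
     s.1 ++ [s.2.1]) = res ++ pvGo y days l := by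
  induction l with
  | nil => intro res days y; simp [pvGo]
  | cons d l ih =>
    intro res days y
    by_cases h : pvS4 d = y
    · simp only [List.foldl_cons, pvGo, pvS4] at *
      rw [if_pos h, if_pos h, ih]
    · simp only [List.foldl_cons, pvGo, pvS4] at *
      rw [if_neg h, if_neg h, ih]
      simp

lemma pvGo_bump (l : List String) : ∀ (y : String) (c : Int),
    pvGo y (c + 1) l = (match pvGo y c l with | a :: t => (a + 1) :: t | [] => []) := by
  induction l with
  | nil => intro y c; simp [pvGo]
  | cons d l ih =>
    intro y c
    by_cases h : pvS4 d = y
    · simp only [pvGo, if_pos h]; exact ih y (c + 1)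
    · simp [pvGo, if_neg h]

-- Nat-level lookup of the year at position i
def pvYN (l : List String) (i : Nat) : String := pvS4 (l.getD i "")

-- change positions (relative, Nat) of l given the previous year y
def pvCutsFrom (y : String) : List String → List Nat
  | [] => []
  | d :: l =>
    if pvS4 d = y then (pvCutsFrom (pvS4 d) l).map Nat.succ
    else 0 :: (pvCutsFrom (pvS4 d) l).map Nat.succ

lemma pvYN_cons_succ (d : String) (l : List String) (i : Nat) :
    pvYN (d :: l) (i + 1) = pvYN l i := rfl

lemma pvYN_zero (d : String) (l : List String) : pvYN (d :: l) 0 = pvS4 d := rfl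

-- the filter over range equals the recursive cut list
lemma pvFilter_cuts (l : List String) : ∀ (y : String),
    (List.range l.length).filter
      (fun i => !(pvYN l i == (if i = 0 then y else pvYN l (i - 1)))) =
    pvCutsFrom y l := by
  induction l with
  | nil => intro y; simp [pvCutsFrom]
  | cons d l ih =>
    intro y
    rw [List.length_cons, List.range_succ_eq_map, List.filter_cons, List.filter_map]
    have hsucc : ((fun i => !(pvYN (d :: l) i == (if i = 0 then y else pvYN (d :: l) (i - 1)))) ∘ Nat.succ)
        = (fun i => !(pvYN l i == (if i = 0 then pvS4 d else pvYN l (i - 1)))) := by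
      funext i
      simp only [Function.comp]
      cases i with
      | zero => simp [pvYN_cons_succ, pvYN_zero]
      | succ j => simp [pvYN_cons_succ]
    rw [hsucc, ih (pvS4 d)]
    by_cases h : pvS4 d = y
    · simp [pvCutsFrom, pvYN_zero, h]
    · simp [pvCutsFrom, pvYN_zero, h]

def pvShift (a : Int) (ks : List Nat) : List Int := ks.map (fun (k : Nat) => (k : Int) + a + 1)

def pvDiffs (c : List Int) : List Int := (c.zip c.tail).map (fun p => p.2 - p.1)

lemma pvDiffs_cons (a b : Int) (t : List Int) :
    pvDiffs (a :: b :: t) = (b - a) :: pvDiffs (b :: t) := by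
  simp [pvDiffs]

-- shifting commutes with the Nat.succ map on cut positions
lemma pvShift_succ (a : Int) (ks : List Nat) :
    pvShift a (ks.map Nat.succ) = pvShift (a + 1) ks := by
  simp only [pvShift, List.map_map]
  apply List.map_congr_left; intro k _
  simp only [Function.comp, Nat.succ_eq_add_one]; push_cast; ring

-- differences of the shifted cut positions are exactly the run lengths
lemma pvDiffs_cuts (l : List String) : ∀ (y : String) (a : Int),
    pvDiffs (a :: (pvShift a (pvCutsFrom y l) ++ [a + 1 + l.length])) =
    pvGo y 1 l := by
  induction l with
  | nil => intro y a; simp [pvCutsFrom, pvGo, pvDiffs, pvShift]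
  | cons d l ih =>
    intro y a
    have hlen : a + 1 + ((d :: l).length : Int) = (a + 1) + 1 + l.length := by
      push_cast [List.length_cons]; ring
    by_cases h : pvS4 d = y
    · -- head run continues: first difference grows by one
      have hrec := ih (pvS4 d) (a + 1)
      rw [pvCutsFrom, if_pos h, pvShift_succ, hlen]
      have hgo : pvGo y 1 (d :: l) = pvGo (pvS4 d) (1 + 1) l := by
        rw [pvGo, if_pos h, h]
      rw [hgo, pvGo_bump]
      cases hc : pvShift (a + 1) (pvCutsFrom (pvS4 d) l) with
      | nil =>
        rw [hc] at hrec
        simp only [List.nil_append] at hrec ⊢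
        rw [← hrec]; simp [pvDiffs]; ring
      | cons b t =>
        rw [hc] at hrec
        simp only [List.cons_append] at hrec ⊢
        rw [pvDiffs_cons] at hrec ⊢
        rw [← hrec]
        show _ :: _ = _ :: _
        congr 1
        ring
    · -- new run of length 1 starts at d
      have hrec := ih (pvS4 d) (a + 1)
      have hhead : pvShift a (0 :: (pvCutsFrom (pvS4 d) l).map Nat.succ)
          = (a + 1) :: pvShift (a + 1) (pvCutsFrom (pvS4 d) l) := by
        simp only [pvShift, List.map_cons, List.map_map, Nat.cast_zero]
        congr 1
        · ring
        · apply List.map_congr_left; intro k _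
          simp only [Function.comp, Nat.succ_eq_add_one]; push_cast; ring
      rw [pvCutsFrom, if_neg h, hhead, hlen]
      rw [List.cons_append, pvDiffs_cons, hrec]
      rw [pvGo, if_neg h]
      simp

-- B's Int-level filter equals the Nat-level one, mapped
lemma pvB_filter (dates : List String) :
    (PySem.List.pyRange 0 (dates.length : Int) 1).filter
      (fun i => i == 0 || !(pvYAt dates i == pvYAt dates (i - 1))) =
    ((List.range dates.length).filter
      (fun i => i == 0 || !(pvYN dates i == pvYN dates (i - 1)))).map (fun (k : Nat) => (k : Int)) := by
  have h0 : (dates.length : Int) - 0 = (dates.length : Int) := by ring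
  rw [PySem.List.pyRange_one, h0, Int.toNat_natCast, List.filter_map]
  simp only [zero_add]
  congr 1
  apply List.filter_congr
  intro i _
  simp only [Function.comp]
  cases i with
  | zero => simp
  | succ j =>
    have h2 : ((j + 1 : Nat) : Int) - 1 = ((j : Nat) : Int) := by push_cast; ring
    have hy1 : pvYAt dates ((j + 1 : Nat) : Int) = pvYN dates (j + 1) := by
      unfold pvYAt pvYN pvS4
      rw [PySem.List.pyGet?_natCast, List.getD_eq_getElem?_getD]
    have hy2 : pvYAt dates ((j : Nat) : Int) = pvYN dates j := by
      unfold pvYAt pvYN pvS4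
      rw [PySem.List.pyGet?_natCast, List.getD_eq_getElem?_getD]
    rw [h2, hy1, hy2]
    simp
    intro hx
    exact absurd hx (by omega)

-- the Nat-level filter on a cons: index 0 is kept, the rest are the recursive cut positions
lemma pvFilter_B (d : String) (l : List String) :
    (List.range (d :: l).length).filter
      (fun i => i == 0 || !(pvYN (d :: l) i == pvYN (d :: l) (i - 1))) =
    0 :: (pvCutsFrom (pvS4 d) l).map Nat.succ := by
  rw [List.length_cons, List.range_succ_eq_map, List.filter_cons, List.filter_map]
  have hsucc : ((fun i => i == 0 || !(pvYN (d :: l) i == pvYN (d :: l) (i - 1))) ∘ Nat.succ)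
      = (fun i => !(pvYN l i == (if i = 0 then pvS4 d else pvYN l (i - 1)))) := by
    funext i
    simp only [Function.comp]
    cases i with
    | zero => simp [pvYN_cons_succ, pvYN_zero]
    | succ j => simp [pvYN_cons_succ]
  rw [hsucc, pvFilter_cuts l (pvS4 d)]
  simp

-- casting the successor positions to Int is the shift by 0
lemma pvCast_shift (C : List Nat) :
    (C.map Nat.succ).map (fun (k : Nat) => (k : Int)) = pvShift 0 C := by
  simp only [pvShift, List.map_map]
  apply List.map_congr_left; intro k _
  simp [Function.comp, Nat.succ_eq_add_one]

-- ===== VERDICT (by name: the statement is the Claim_ definition above) =====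
theorem count_year_days_spec : Claim_equal_count_year_days := by
  intro dates _ hpre
  unfold Spec_count_year_days
  match dates with
  | [] => exact absurd rfl hpre
  | d :: l =>
    show count_year_days (d :: l) = count_year_days_alt (d :: l)
    unfold count_year_days count_year_days_alt
    simp only
    rw [pvA_loop (d :: l) [] 0 (PySem.Str.slice d (some 0) (some 4))]
    rw [pvB_filter, pvFilter_B, List.map_cons, pvCast_shift]
    have hA : pvGo (pvS4 d) 0 (d :: l) = pvGo (pvS4 d) 1 l := by
      rw [pvGo, if_pos rfl]; norm_num
    show ([] : List Int) ++ pvGo (pvS4 d) 0 (d :: l) = _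
    rw [List.nil_append, hA]
    have hlen : (((d :: l).length : Nat) : Int) = 0 + 1 + l.length := by
      push_cast [List.length_cons]; ring
    have hcuts : ((0 : Int) :: pvShift 0 (pvCutsFrom (pvS4 d) l)) ++ [(((d :: l).length : Nat) : Int)]
        = (0 : Int) :: (pvShift 0 (pvCutsFrom (pvS4 d) l) ++ [0 + 1 + (l.length : Int)]) := by
      rw [hlen]; simp
    simp only [Nat.cast_zero]
    rw [hcuts]
    exact (pvDiffs_cuts l (pvS4 d) 0).symm
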